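-- pv_equiv track=rewrite | github.com/thel7egend-sudo/Excelify | editor_page.py | _normalized_marker_positions
-- ===== SOURCE A (Python) =====
-- def _normalized_marker_positions(marker_positions, length):
--     if length <= 1:
--         return []
--
--     normalized = []
--     for pos in marker_positions:
--         try:
--             p = int(pos)
--         except (TypeError, ValueError):
--             continue
--         # Clamp to valid split points so one Enter consistently works.
--         p = max(1, min(p, length - 1))
--         normalized.append(p)
--
--     return sorted(set(normalized))
-- ===== SOURCE B (Python) =====
-- def _normalized_marker_positions(marker_positions, length):
--     if length <= 1:
--         return []
--
--     result = []
--     for pos in marker_positions: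
--         try:
--             p = int(pos)
--         except (TypeError, ValueError):
--             continue
--         p = max(1, min(p, length - 1))
--         # Insert p at its sorted position, skipping it if already present.
--         i = 0
--         while i < len(result) and result[i] < p:
--             i += 1
--         if i == len(result) or result[i] != p:
--             result.insert(i, p)
--     return result
-- ===== Notes on version B (the rewrite author's own statement) =====
-- stated objective: alternative
-- what changed: B maintains a sorted deduplicated list by ordered insertion in a single pass over the markers, instead of accumulating all clamped values and calling sorted(set(...)) at the end.
import Mathlib
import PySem

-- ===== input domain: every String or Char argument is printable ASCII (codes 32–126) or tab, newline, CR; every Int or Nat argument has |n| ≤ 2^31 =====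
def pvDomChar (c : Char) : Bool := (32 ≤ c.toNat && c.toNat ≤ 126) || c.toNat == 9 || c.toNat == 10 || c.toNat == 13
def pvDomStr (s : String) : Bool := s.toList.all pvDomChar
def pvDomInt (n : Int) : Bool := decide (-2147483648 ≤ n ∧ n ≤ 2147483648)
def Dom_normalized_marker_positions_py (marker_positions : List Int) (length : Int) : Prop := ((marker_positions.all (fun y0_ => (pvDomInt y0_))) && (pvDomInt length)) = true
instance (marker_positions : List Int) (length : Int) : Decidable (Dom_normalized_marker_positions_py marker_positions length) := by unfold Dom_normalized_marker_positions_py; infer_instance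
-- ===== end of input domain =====

-- B maintains a sorted deduplicated list by ordered insertion in one pass,
-- instead of accumulating all clamped values and calling sorted(set(...)) afterwards.

-- ===== PORT A =====
-- int(pos) on an Int argument never raises, so the try/except is the identity.
def normalized_marker_positions_py (marker_positions : List Int) (length : Int) : List Int :=
  if length ≤ 1 then []
  else
    let normalized := marker_positions.foldl
      (fun acc pos => acc ++ [max 1 (min pos (length - 1))]) []
    PySem.List.sorted (PySem.Set.ofList normalized) (fun x => x) false

-- ===== PORT B =====
-- the scan-then-insert of Source B: walk past the elements < p, then insert p unless present
def pvInsUnique (p : Int) : List Int → List Int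
  | [] => [p]
  | y :: ys => if y < p then y :: pvInsUnique p ys else if y ≠ p then p :: y :: ys else y :: ys

def normalized_marker_positions_py_alt (marker_positions : List Int) (length : Int) : List Int :=
  if length ≤ 1 then []
  else
    marker_positions.foldl
      (fun result pos => pvInsUnique (max 1 (min pos (length - 1))) result) []

-- ===== PRECONDITION & SPEC =====
def Spec_normalized_marker_positions_py (marker_positions : List Int) (length : Int) (out : List Int) : Prop := out = normalized_marker_positions_py_alt marker_positions length
instance (marker_positions : List Int) (length : Int) (out : List Int) : Decidable (Spec_normalized_marker_positions_py marker_positions length out) := by unfold Spec_normalized_marker_positions_py; infer_instance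

-- ===== CLAIM (what is proved, stated in full; the proofs are below) =====
def Claim_equal_normalized_marker_positions_py : Prop := ∀ (marker_positions : List Int) (length : Int), Dom_normalized_marker_positions_py marker_positions length → Spec_normalized_marker_positions_py marker_positions length (normalized_marker_positions_py marker_positions length)

-- ===== LEMMAS AND PROOFS =====

theorem pv_mem_insUnique (p y : Int) (l : List Int) :
    y ∈ pvInsUnique p l ↔ y = p ∨ y ∈ l := by
  induction l with
  | nil => simp [pvInsUnique]
  | cons a as ih =>
    simp only [pvInsUnique]
    split_ifs with h1 h2 <;> simp [ih] <;> (try tauto) <;> (intro h; omega)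

theorem pv_pairwise_insUnique (p : Int) (l : List Int) (h : l.Pairwise (· < ·)) :
    (pvInsUnique p l).Pairwise (· < ·) := by
  induction l with
  | nil => simp [pvInsUnique]
  | cons a as ih =>
    rw [List.pairwise_cons] at h
    simp only [pvInsUnique]
    split_ifs with h1 h2
    · rw [List.pairwise_cons]
      refine ⟨fun y hy => ?_, ih h.2⟩
      rw [pv_mem_insUnique] at hy
      rcases hy with rfl | hy
      · exact h1
      · exact h.1 y hy
    · rw [List.pairwise_cons]
      refine ⟨fun y hy => ?_, List.pairwise_cons.mpr h⟩
      rcases List.mem_cons.mp hy with rfl | hy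
      · omega
      · have := h.1 y hy; omega
    · exact List.pairwise_cons.mpr h

theorem pv_mem_foldl_insUnique (cl : Int → Int) (xs : List Int) (acc : List Int) (y : Int) :
    y ∈ xs.foldl (fun result pos => pvInsUnique (cl pos) result) acc ↔
      y ∈ acc ∨ ∃ p ∈ xs, y = cl p := by
  induction xs generalizing acc with
  | nil => simp
  | cons a as ih =>
    simp only [List.foldl_cons, ih, pv_mem_insUnique, List.mem_cons]
    constructor
    · rintro (h | ⟨p, hp, rfl⟩)
      · rcases h with rfl | h
        · exact Or.inr ⟨a, Or.inl rfl, rfl⟩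
        · exact Or.inl h
      · exact Or.inr ⟨p, Or.inr hp, rfl⟩
    · rintro (h | ⟨p, rfl | hp, rfl⟩)
      · exact Or.inl (Or.inr h)
      · exact Or.inl (Or.inl rfl)
      · exact Or.inr ⟨p, hp, rfl⟩

theorem pv_pairwise_foldl_insUnique (cl : Int → Int) (xs : List Int) (acc : List Int)
    (h : acc.Pairwise (· < ·)) :
    (xs.foldl (fun result pos => pvInsUnique (cl pos) result) acc).Pairwise (· < ·) := by
  induction xs generalizing acc with
  | nil => exact h
  | cons a as ih => exact ih _ (pv_pairwise_insUnique _ _ h)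

-- The one-pass ordered insertion names the sorted order of the deduplicated clamped values.
theorem pv_key (marker_positions : List Int) (length : Int) (hL : ¬ length ≤ 1) :
    normalized_marker_positions_py marker_positions length
      = normalized_marker_positions_py_alt marker_positions length := by
  unfold normalized_marker_positions_py normalized_marker_positions_py_alt
  simp only [if_neg hL]
  set cl : Int → Int := fun pos => max 1 (min pos (length - 1)) with hcl
  have hA : marker_positions.foldl (fun acc pos => acc ++ [cl pos]) []
      = marker_positions.map cl := PySem.List.foldl_append_singleton_eq_map ..
  rw [hA]
  set S := PySem.Set.ofList (marker_positions.map cl) with hS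
  set F := marker_positions.foldl (fun result pos => pvInsUnique (cl pos) result) [] with hF
  have hpw : F.Pairwise (· < ·) := pv_pairwise_foldl_insUnique cl _ [] (by simp)
  have hmemF : ∀ x, x ∈ F ↔ x ∈ S := by
    intro x
    rw [hF, pv_mem_foldl_insUnique, hS, PySem.Set.mem_ofList, List.mem_map]
    constructor
    · rintro (h | ⟨p, hp, rfl⟩)
      · simp at h
      · exact ⟨p, hp, rfl⟩
    · rintro ⟨p, hp, rfl⟩
      exact Or.inr ⟨p, hp, rfl⟩
  have hperm : F.Perm S := by
    rw [List.perm_ext_iff_of_nodup hpw.nodup (PySem.Set.nodup_ofList _)]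
    exact hmemF
  exact PySem.List.sorted_eq_of_perm_of_pairwise_lt S F (fun x => x) hperm hpw

-- ===== VERDICT (by name: the statement is the Claim_ definition above) =====
theorem normalized_marker_positions_py_spec : Claim_equal_normalized_marker_positions_py := by
  intro marker_positions length _
  unfold Spec_normalized_marker_positions_py
  by_cases hL : length ≤ 1
  · unfold normalized_marker_positions_py normalized_marker_positions_py_alt
    simp [hL]
  · exact pv_key marker_positions length hL
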